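-- pv_equiv track=rewrite | github.com/Geng1997/GEC-Model | utils.py | get_f_name
-- ===== SOURCE A (Python) =====
-- def get_f_name(DATA, SF, CM, OP, VS):
--     F_NAME = []
--     for sf in SF:
--         for cm in CM:
--             for op in OP:
--                 for vs in VS:
--                     F_NAME.append(DATA+sf+cm+op+vs+".json")
--     return F_NAME
-- ===== SOURCE B (Python) =====
-- def get_f_name(DATA, SF, CM, OP, VS):
--     acc = [DATA]
--     for lst in (SF, CM, OP, VS):
--         acc = [p + x for p in acc for x in lst]
--     return [p + ".json" for p in acc]
-- ===== Notes on version B (the rewrite author's own statement) =====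
-- stated objective: alternative
-- what changed: Replaces the four fixed nested loops with a single fold over the sequence of input lists, maintaining a growing list of partial prefix strings that is extended by each list in turn and suffixed with '.json' at the end.
import Mathlib
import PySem

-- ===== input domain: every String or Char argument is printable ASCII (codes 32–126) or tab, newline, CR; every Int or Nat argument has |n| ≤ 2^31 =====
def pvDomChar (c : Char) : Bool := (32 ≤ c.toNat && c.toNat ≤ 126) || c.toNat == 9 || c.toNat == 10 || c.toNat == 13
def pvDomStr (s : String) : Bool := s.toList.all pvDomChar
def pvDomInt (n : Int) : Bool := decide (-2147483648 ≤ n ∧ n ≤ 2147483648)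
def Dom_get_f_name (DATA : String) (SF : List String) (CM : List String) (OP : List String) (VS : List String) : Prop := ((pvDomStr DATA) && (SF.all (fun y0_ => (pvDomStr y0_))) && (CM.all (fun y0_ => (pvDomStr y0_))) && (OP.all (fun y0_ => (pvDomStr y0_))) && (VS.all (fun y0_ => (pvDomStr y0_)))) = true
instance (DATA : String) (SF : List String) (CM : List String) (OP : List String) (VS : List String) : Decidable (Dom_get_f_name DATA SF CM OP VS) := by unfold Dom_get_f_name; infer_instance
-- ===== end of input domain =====

-- B replaces the four fixed nested loops with one fold over the list of input lists, extending partial prefixes (alternative decomposition, same cost).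


-- ===== PORT A =====
-- Port of A: four nested loops appending DATA+sf+cm+op+vs+".json".
def get_f_name (DATA : String) (SF : List String) (CM : List String) (OP : List String) (VS : List String) : List String :=
  SF.foldl (fun F_NAME sf =>
    CM.foldl (fun F_NAME cm =>
      OP.foldl (fun F_NAME op =>
        VS.foldl (fun F_NAME vs =>
          F_NAME ++ [DATA ++ sf ++ cm ++ op ++ vs ++ ".json"]) F_NAME) F_NAME) F_NAME) []

-- ===== PORT B =====
-- Port of B: fold over the four lists, extending every partial prefix, then suffix ".json".
def get_f_name_alt (DATA : String) (SF : List String) (CM : List String) (OP : List String) (VS : List String) : List String :=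
  ([SF, CM, OP, VS].foldl (fun acc lst => acc.flatMap (fun p => lst.map (fun x => p ++ x))) [DATA]).map
    (fun p => p ++ ".json")

-- ===== PRECONDITION & SPEC =====
def Spec_get_f_name (DATA : String) (SF : List String) (CM : List String) (OP : List String) (VS : List String) (out : List String) : Prop := out = get_f_name_alt DATA SF CM OP VS
instance (DATA : String) (SF : List String) (CM : List String) (OP : List String) (VS : List String) (out : List String) : Decidable (Spec_get_f_name DATA SF CM OP VS out) := by unfold Spec_get_f_name; infer_instance

-- ===== CLAIM (what is proved, stated in full; the proofs are below) =====
def Claim_equal_get_f_name : Prop := ∀ (DATA : String) (SF : List String) (CM : List String) (OP : List String) (VS : List String), Dom_get_f_name DATA SF CM OP VS → Spec_get_f_name DATA SF CM OP VS (get_f_name DATA SF CM OP VS)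

-- ===== LEMMAS AND PROOFS =====

-- ===== VERDICT (by name: the statement is the Claim_ definition above) =====
theorem get_f_name_spec : Claim_equal_get_f_name := by
  intro DATA SF CM OP VS _
  unfold Spec_get_f_name get_f_name get_f_name_alt
  simp only [PySem.List.foldl_append_singleton_eq_map, List.nil_append]
  simp [List.flatMap_assoc, List.map_flatMap, List.flatMap_map, Function.comp_def,
    String.append_assoc, List.flatMap_def, List.flatten_flatten, List.map_map]
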